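-- pv_equiv track=rewrite | github.com/LucindaAshdown/Tablevation | helium testing (python)/build/lib/bfs/bfs10063/bfs11143.py | bfs11153
-- ===== SOURCE A (Python) =====
-- def bfs11153(x, bfs11147):
--   bfs11150 = 0
--   bfs11151 = 0
--   for bfs11152 in reversed(x):
--     bfs11154 = bfs11147.index(bfs11152)
--     bfs11150 += (bfs11154 * (len(bfs11147) ** bfs11151))
--     bfs11151 += 1
--
--   return bfs11150
-- ===== SOURCE B (Python) =====
-- def bfs11153(x, bfs11147):
--   result = 0
--   for symbol in x:
--     result = result * len(bfs11147) + bfs11147.index(symbol)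
--   return result
-- ===== Notes on version B (the rewrite author's own statement) =====
-- stated objective: faster
-- what changed: Replaces the reversed-order loop with an explicit exponent counter and per-step power len(alphabet)**i by Horner's method: a forward pass keeping a single accumulator result = result*len(alphabet) + index.
import Mathlib
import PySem

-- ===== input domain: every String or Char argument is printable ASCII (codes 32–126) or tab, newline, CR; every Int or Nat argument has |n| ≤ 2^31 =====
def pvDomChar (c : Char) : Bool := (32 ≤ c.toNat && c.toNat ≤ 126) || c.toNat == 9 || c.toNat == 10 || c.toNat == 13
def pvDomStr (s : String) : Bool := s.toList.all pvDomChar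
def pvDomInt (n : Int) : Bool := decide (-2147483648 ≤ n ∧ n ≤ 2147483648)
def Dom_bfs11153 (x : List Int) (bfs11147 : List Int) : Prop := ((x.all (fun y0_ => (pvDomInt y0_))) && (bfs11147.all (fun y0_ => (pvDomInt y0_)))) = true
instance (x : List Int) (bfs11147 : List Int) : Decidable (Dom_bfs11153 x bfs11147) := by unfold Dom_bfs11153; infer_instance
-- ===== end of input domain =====

-- B replaces A's reversed loop with exponent counter and per-step power base**i by a forward Horner pass with one accumulator (objective: faster; a timing run measured B faster).

-- ===== PORT A =====
-- `.index` raises ValueError when the element is missing; exact on Pre_ (getD 0 is never taken there).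
def pyIndexInt (l : List Int) (v : Int) : Int := ((PySem.List.index? l v).getD 0 : Nat)

def bfs11153 (x : List Int) (bfs11147 : List Int) : Int :=
  (x.reverse.foldl
    (fun (st : Int × Nat) bfs11152 =>
      let bfs11154 := pyIndexInt bfs11147 bfs11152
      (st.1 + bfs11154 * ((bfs11147.length : Int) ^ st.2), st.2 + 1))
    (0, 0)).1

-- ===== PORT B =====
def bfs11153_alt (x : List Int) (bfs11147 : List Int) : Int :=
  x.foldl (fun result symbol => result * (bfs11147.length : Int) + pyIndexInt bfs11147 symbol) 0

-- ===== PRECONDITION & SPEC =====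
-- Pre_ excludes exactly the inputs where Python's list.index raises ValueError (a symbol of x missing from the alphabet); both A and B raise there.
def Pre_bfs11153 (x : List Int) (bfs11147 : List Int) : Prop := ∀ v ∈ x, v ∈ bfs11147
instance (x : List Int) (bfs11147 : List Int) : Decidable (Pre_bfs11153 x bfs11147) := by unfold Pre_bfs11153; infer_instance
def pvWitness_bfs11153 : List Int × List Int := ([2, 0, 1], [0, 1, 2])

def Spec_bfs11153 (x : List Int) (bfs11147 : List Int) (out : Int) : Prop := out = bfs11153_alt x bfs11147
instance (x : List Int) (bfs11147 : List Int) (out : Int) : Decidable (Spec_bfs11153 x bfs11147 out) := by unfold Spec_bfs11153; infer_instance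

-- ===== CLAIM (what is proved, stated in full; the proofs are below) =====
def Claim_equal_bfs11153 : Prop := ∀ (x : List Int) (bfs11147 : List Int), Dom_bfs11153 x bfs11147 → Pre_bfs11153 x bfs11147 → Spec_bfs11153 x bfs11147 (bfs11153 x bfs11147)

-- ===== LEMMAS AND PROOFS =====

-- little-endian value of a digit list
def pvW (a : List Int) (l : List Int) : Int :=
  match l with
  | [] => 0
  | d :: t => pyIndexInt a d + (a.length : Int) * pvW a t

theorem pvW_append_singleton (a : List Int) (m : List Int) (d : Int) :
    pvW a (m ++ [d]) = pvW a m + pyIndexInt a d * (a.length : Int) ^ m.length := by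
  induction m with
  | nil => simp [pvW]
  | cons e t ih => simp [pvW, ih]; ring

theorem pvA_fold (a : List Int) (l : List Int) (s : Int) (e : Nat) :
    (l.foldl
      (fun (st : Int × Nat) d =>
        (st.1 + pyIndexInt a d * ((a.length : Int) ^ st.2), st.2 + 1))
      (s, e)).1 = s + (a.length : Int) ^ e * pvW a l := by
  induction l generalizing s e with
  | nil => simp [pvW]
  | cons d t ih => simp [List.foldl, pvW, ih]; ring

theorem pvB_fold (a : List Int) (l : List Int) (acc : Int) :
    l.foldl (fun result symbol => result * (a.length : Int) + pyIndexInt a symbol) acc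
      = acc * (a.length : Int) ^ l.length + pvW a l.reverse := by
  induction l generalizing acc with
  | nil => simp [pvW]
  | cons d t ih =>
    simp [List.foldl, ih, List.reverse_cons, pvW_append_singleton, List.length_reverse]
    ring

-- ===== VERDICT (by name: the statement is the Claim_ definition above) =====
theorem bfs11153_spec : Claim_equal_bfs11153 := by
  intro x a _ _
  unfold Spec_bfs11153 bfs11153 bfs11153_alt
  rw [pvA_fold, pvB_fold]
  simp
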